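-- pv_equiv track=rewrite | github.com/tdansa7/stock_predction_TFT | deep_ai_ori_all_46lstm_test1o_hour1_5_30_crust225_y.py | count_plus_streak
-- ===== SOURCE A (Python) =====
-- def count_plus_streak(column):
--     streaks = []  # 各セルごとの連続マイナスのカウント
--     count = 0     # 連続マイナスのカウント
--
--     for val in column:
--         if val > 0:
--             count += 1
--         else:
--             count = 0
--         streaks.append(count)
--
--     return streaks
-- ===== SOURCE B (Python) =====
-- from itertools import groupby
--
-- def count_plus_streak(column):
--     streaks = []
--     for is_pos, grp in groupby(column, key=lambda v: v > 0):
--         n = len(list(grp))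
--         streaks.extend(range(1, n + 1) if is_pos else [0] * n)
--     return streaks
-- ===== Notes on version B (the rewrite author's own statement) =====
-- stated objective: alternative
-- what changed: Replaces the element-wise stateful counter with itertools.groupby run-partitioning: each maximal same-sign run is expanded at once to an increasing ramp or to zeros.
import Mathlib
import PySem

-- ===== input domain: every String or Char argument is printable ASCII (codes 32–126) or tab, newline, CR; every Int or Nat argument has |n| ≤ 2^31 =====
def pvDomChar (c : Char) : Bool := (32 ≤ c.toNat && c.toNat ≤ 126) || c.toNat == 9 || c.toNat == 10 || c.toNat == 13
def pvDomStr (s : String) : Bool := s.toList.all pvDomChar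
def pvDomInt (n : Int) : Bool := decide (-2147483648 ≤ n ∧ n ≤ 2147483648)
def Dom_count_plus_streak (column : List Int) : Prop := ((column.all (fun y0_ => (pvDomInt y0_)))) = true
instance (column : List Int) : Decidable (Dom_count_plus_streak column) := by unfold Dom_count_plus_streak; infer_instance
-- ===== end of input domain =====

-- B partitions the input into maximal same-sign runs (groupby) and expands each run
-- at once, instead of A's element-wise stateful counter; return values agree on all inputs.


-- ===== PORT A =====
-- A: fold over the column keeping (count, streaks); append count after each element.
def count_plus_streak (column : List Int) : List Int :=
  (column.foldl
    (fun (st : Int × List Int) val =>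
      let count := if val > 0 then st.1 + 1 else (0 : Int)
      (count, st.2 ++ [count]))
    (0, [])).2

-- ===== PORT B =====
-- B: groupby-style run partitioning — take the maximal run with the head's sign,
-- expand it to range(1, L+1) or L zeros, recurse on the rest.
def count_plus_streak_alt (column : List Int) : List Int :=
  match column with
  | [] => []
  | x :: xs =>
    let k : Bool := decide (x > 0)
    let grp := xs.takeWhile (fun v => decide (v > 0) == k)
    let rest := xs.dropWhile (fun v => decide (v > 0) == k)
    let L := grp.length + 1
    (if k then (List.range L).map (fun i : Nat => (i : Int) + 1) else List.replicate L (0 : Int))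
      ++ count_plus_streak_alt rest
termination_by column.length
decreasing_by
  exact Nat.lt_succ_of_le (List.length_dropWhile_le _ _)

-- ===== PRECONDITION & SPEC =====
def Spec_count_plus_streak (column : List Int) (out : List Int) : Prop := out = count_plus_streak_alt column
instance (column : List Int) (out : List Int) : Decidable (Spec_count_plus_streak column out) := by unfold Spec_count_plus_streak; infer_instance

-- ===== CLAIM (what is proved, stated in full; the proofs are below) =====
def Claim_equal_count_plus_streak : Prop := ∀ (column : List Int), Dom_count_plus_streak column → Spec_count_plus_streak column (count_plus_streak column)

-- ===== LEMMAS AND PROOFS =====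

theorem dropWhile_head_not {a : Type} (p : a → Bool) (xs : List a) (r : a) (rs : List a)
    (h : xs.dropWhile p = r :: rs) : p r = false := by
  have hne : xs.dropWhile p ≠ [] := by simp [h]
  have hh := List.head_dropWhile_not p hne
  simp only [h, List.head_cons] at hh
  exact hh

-- A's loop as a direct recursion on (count, remaining list).
def aGo (c : Int) : List Int → List Int
  | [] => []
  | v :: vs => let c' := if v > 0 then c + 1 else 0; c' :: aGo c' vs

theorem aFold_eq (l : List Int) : ∀ (c : Int) (acc : List Int),
    (l.foldl (fun (st : Int × List Int) val =>
        let count := if val > 0 then st.1 + 1 else (0 : Int)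
        (count, st.2 ++ [count])) (c, acc)).2 = acc ++ aGo c l := by
  induction l with
  | nil => simp [aGo]
  | cons v vs ih => intro c acc; simp [aGo, ih]

theorem aGo_nonpos_run (grp : List Int) (h : ∀ v ∈ grp, ¬ v > 0) (rest : List Int) :
    aGo 0 (grp ++ rest) = List.replicate grp.length (0 : Int) ++ aGo 0 rest := by
  induction grp with
  | nil => simp
  | cons g gs ih =>
    have hg : ¬ g > 0 := h g (by simp)
    simp only [List.cons_append, aGo, hg, if_neg, not_false_iff, List.length_cons,
      List.replicate_succ]
    rw [ih (fun v hv => h v (by simp [hv]))]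

theorem aGo_pos_run (grp : List Int) (h : ∀ v ∈ grp, v > 0) (c : Int) (rest : List Int) :
    aGo c (grp ++ rest) = (List.range grp.length).map (fun i : Nat => c + 1 + (i : Int))
      ++ aGo (c + grp.length) rest := by
  induction grp generalizing c with
  | nil => simp
  | cons g gs ih =>
    have hg : g > 0 := h g (by simp)
    simp only [List.cons_append, aGo, List.length_cons]
    rw [if_pos hg, ih (fun v hv => h v (by simp [hv])) (c + 1)]
    rw [List.range_succ_eq_map, List.map_cons, List.map_map]
    simp only [List.cons_append]
    congr 1
    · push_cast; ring
    congr 1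
    · apply List.map_congr_left; intro i _; simp only [Function.comp]; push_cast; ring
    · congr 1; push_cast; ring

-- starting count is irrelevant when the next element (if any) is non-positive
theorem aGo_reset (rest : List Int)
    (h : rest = [] ∨ ∃ r rs, rest = r :: rs ∧ ¬ r > 0) (c : Int) :
    aGo c rest = aGo 0 rest := by
  rcases h with h | ⟨r, rs, hr, hneg⟩
  · simp [h, aGo]
  · simp [hr, aGo, hneg]

theorem aGo_eq_alt (l : List Int) : aGo 0 l = count_plus_streak_alt l := by
  induction hn : l.length using Nat.strong_induction_on generalizing l with
  | _ n ih =>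
  cases l with
  | nil => rw [count_plus_streak_alt]; simp [aGo]
  | cons x xs =>
    rw [count_plus_streak_alt]
    set k : Bool := decide (x > 0) with hk
    set grp := xs.takeWhile (fun v => decide (v > 0) == k) with hgrp
    set rest := xs.dropWhile (fun v => decide (v > 0) == k) with hrest
    have hsplit : xs = grp ++ rest := (List.takeWhile_append_dropWhile).symm
    have hgmem : ∀ v ∈ grp, (decide (v > 0) == k) = true := by
      rw [hgrp]; intro v hv
      exact @List.mem_takeWhile_imp _ (fun v => decide (v > 0) == k) xs v hv
    have ihrest : aGo 0 rest = count_plus_streak_alt rest := by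
      apply ih rest.length _ rest rfl
      have hrl : rest.length ≤ xs.length := by
        rw [hrest]; exact List.length_dropWhile_le _ _
      simp only [← hn, List.length_cons]; omega
    have hresthead : rest = [] ∨ ∃ r rs, rest = r :: rs ∧ (decide (r > 0) == k) = false := by
      cases hc : rest with
      | nil => exact Or.inl rfl
      | cons r rs =>
        refine Or.inr ⟨r, rs, rfl, ?_⟩
        have hd : xs.dropWhile (fun v => decide (v > 0) == k) = r :: rs := by
          rw [← hrest]; exact hc
        have := dropWhile_head_not (fun v => decide (v > 0) == k) xs r rs hd
        simpa using this
    by_cases hx : x > 0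
    · have hkT : k = true := by rw [hk]; simp [hx]
      have hgpos : ∀ v ∈ grp, v > 0 := by
        intro v hv; have := hgmem v hv; rw [hkT] at this; simpa using this
      have hreset : aGo ((0:Int) + 1 + grp.length) rest = aGo 0 rest := by
        apply aGo_reset
        rcases hresthead with h | ⟨r, rs, hr, hneg⟩
        · exact Or.inl h
        · refine Or.inr ⟨r, rs, hr, ?_⟩
          rw [hkT] at hneg; simpa using hneg
      have : aGo 0 (x :: xs) = (0 + 1) :: aGo (0 + 1) (grp ++ rest) := by
        rw [← hsplit]; simp only [aGo]; rw [if_pos hx]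
      rw [this, aGo_pos_run grp hgpos ((0:Int)+1) rest, hreset, ihrest, hkT]
      simp only [if_pos]
      rw [List.range_succ_eq_map, List.map_cons, List.map_map]
      simp only [List.cons_append]
      congr 1
      congr 1
      apply List.map_congr_left
      intro i _
      simp only [Function.comp_apply]
      push_cast
      ring
    · have hkF : k = false := by rw [hk]; simp [hx]
      have hgneg : ∀ v ∈ grp, ¬ v > 0 := by
        intro v hv; have := hgmem v hv; rw [hkF] at this; simpa using this
      have : aGo 0 (x :: xs) = (0:Int) :: aGo 0 (grp ++ rest) := by
        rw [← hsplit]; simp only [aGo]; rw [if_neg hx]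
      rw [this, aGo_nonpos_run grp hgneg rest, ihrest, hkF]
      simp [List.replicate_succ]

-- ===== VERDICT (by name: the statement is the Claim_ definition above) =====
theorem count_plus_streak_spec : Claim_equal_count_plus_streak := by
  intro column _
  unfold Spec_count_plus_streak count_plus_streak
  rw [aFold_eq, List.nil_append, aGo_eq_alt]
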